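-- pv_equiv track=rewrite | github.com/aschlumpf/pyprojects | music_recommender.py | matchNum
-- ===== SOURCE A (Python) =====
-- def matchNum(L1, L2):
--     ''' Calculates the number of matches two lists share. '''
--     L1.sort()
--     L2.sort()
--     count = 0
--     i = 0
--     j = 0
--     while i < len(L1) and j < len(L2):
--         if L1[i] == L2[j]:
--                 i += 1
--                 j += 1
--                 count += 1
--         elif L1[i] > L2[j]:
--                 j += 1
--         else:
--                 i += 1
--     return count
-- ===== SOURCE B (Python) =====
-- def matchNum(L1, L2):
--     ''' Calculates the number of matches two lists share. '''
--     # in-place sorts kept so the observable mutation of the arguments matches A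
--     L1.sort()
--     L2.sort()
--     c2 = {}
--     for x in L2:
--         c2[x] = c2.get(x, 0) + 1
--     count = 0
--     for x in L1:
--         if c2.get(x, 0) > 0:
--             c2[x] = c2[x] - 1
--             count += 1
--     return count
-- ===== Notes on version B (the rewrite author's own statement) =====
-- stated objective: alternative
-- what changed: Replaces A's twin-pointer walk over the two sorted lists with a frequency dict built from L2 whose budgets are decremented while scanning L1 (the in-place sorts are kept so the observable mutation of both arguments matches A).
import Mathlib
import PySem

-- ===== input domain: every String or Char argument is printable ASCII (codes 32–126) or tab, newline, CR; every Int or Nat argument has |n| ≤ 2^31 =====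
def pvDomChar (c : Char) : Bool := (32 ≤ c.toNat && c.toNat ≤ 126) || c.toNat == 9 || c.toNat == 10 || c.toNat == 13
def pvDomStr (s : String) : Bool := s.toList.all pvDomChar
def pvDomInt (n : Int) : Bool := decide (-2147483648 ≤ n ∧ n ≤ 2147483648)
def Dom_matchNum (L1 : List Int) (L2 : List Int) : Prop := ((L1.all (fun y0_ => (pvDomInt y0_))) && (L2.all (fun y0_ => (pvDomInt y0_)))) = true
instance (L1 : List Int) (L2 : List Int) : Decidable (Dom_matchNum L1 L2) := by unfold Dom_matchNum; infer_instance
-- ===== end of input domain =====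

-- B replaces A's twin-pointer walk by a frequency dict of L2 consumed while scanning L1 (alternative
-- algorithm, same cost); both versions sort L1 and L2 in place, the equivalence is about the return value.

-- ===== PORT A =====
-- A's while loop over indices i, j into the two sorted lists, as the obvious structural
-- recursion over the same state: the unread suffixes L1[i:], L2[j:] and the accumulator count
def matchNumLoop : List Int → List Int → Int → Int
  | a :: as, b :: bs, count =>
    if a = b then matchNumLoop as bs (count + 1)
    else if a > b then matchNumLoop (a :: as) bs count
    else matchNumLoop as (b :: bs) count
  | _, _, count => count

def matchNum (L1 : List Int) (L2 : List Int) : Int :=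
  matchNumLoop (PySem.List.sorted L1 (fun x => x) false) (PySem.List.sorted L2 (fun x => x) false) 0

-- ===== PORT B =====
-- body of B's second loop: decrement x's budget in the dict and count, if any budget is left
def bStep (st : PySem.Dict Int Int × Int) (x : Int) : PySem.Dict Int Int × Int :=
  if st.1.getD x 0 > 0 then (st.1.insert x (st.1.getD x 0 - 1), st.2 + 1) else st

def matchNum_alt (L1 : List Int) (L2 : List Int) : Int :=
  ((PySem.List.sorted L1 (fun x => x) false).foldl bStep
    ((PySem.List.sorted L2 (fun x => x) false).foldl
      (fun d x => d.insert x (d.getD x 0 + 1)) PySem.Dict.empty, 0)).2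

-- ===== PRECONDITION & SPEC =====
def Spec_matchNum (L1 : List Int) (L2 : List Int) (out : Int) : Prop := out = matchNum_alt L1 L2
instance (L1 : List Int) (L2 : List Int) (out : Int) : Decidable (Spec_matchNum L1 L2 out) := by unfold Spec_matchNum; infer_instance

-- ===== CLAIM (what is proved, stated in full; the proofs are below) =====
def Claim_equal_matchNum : Prop := ∀ (L1 : List Int) (L2 : List Int), Dom_matchNum L1 L2 → Spec_matchNum L1 L2 (matchNum L1 L2)

-- ===== LEMMAS AND PROOFS =====

-- the common mathematical value: sum over distinct elements of l1 of min of the two multiplicities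
def pvM (l1 l2 : List Int) : Int :=
  ∑ x ∈ l1.toFinset, min ((l1.count x : Int)) ((l2.count x : Int))

lemma pv_sum_erase (S : Finset Int) (a : Int) (f : Int → Int) (h0 : a ∉ S → f a = 0) :
    ∑ x ∈ S, f x = f a + ∑ x ∈ S.erase a, f x := by
  by_cases h : a ∈ S
  · rw [← Finset.sum_erase_add S f h]; ring
  · rw [h0 h, Finset.erase_eq_of_notMem h]; ring

lemma pv_sum_insert (S : Finset Int) (a : Int) (f : Int → Int) :
    ∑ x ∈ insert a S, f x = f a + ∑ x ∈ S.erase a, f x := by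
  rw [pv_sum_erase (insert a S) a f (by simp), Finset.erase_insert_eq_erase]

lemma matchNumLoop_eq_pvM : ∀ (l1 l2 : List Int) (count : Int), l1.Pairwise (· ≤ ·) → l2.Pairwise (· ≤ ·) →
    matchNumLoop l1 l2 count = count + pvM l1 l2 := by
  intro l1 l2 count
  induction l1, l2, count using matchNumLoop.induct with
  | case1 as b bs count ih =>
    intro h1 h2
    rw [matchNumLoop, if_pos rfl, ih h1.tail h2.tail]
    simp only [pvM, List.toFinset_cons]
    rw [pv_sum_insert, pv_sum_erase as.toFinset b
      (fun x => min ((as.count x : Int)) ((bs.count x : Int)))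
      (by intro hmem
          simp only [List.count_eq_zero_of_not_mem (by simpa using hmem)]
          push_cast; omega)]
    have hterm : min (((b :: as).count b : Int)) (((b :: bs).count b : Int))
        = 1 + min ((as.count b : Int)) ((bs.count b : Int)) := by
      simp only [List.count_cons_self]; push_cast; omega
    rw [hterm]
    have hrest : ∀ x ∈ as.toFinset.erase b,
        min (((b :: as).count x : Int)) (((b :: bs).count x : Int))
          = min ((as.count x : Int)) ((bs.count x : Int)) := by
      intro x hx
      have hxa : b ≠ x := fun hc => (Finset.mem_erase.mp hx).1 hc.symm
      simp [List.count_cons_of_ne hxa]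
    rw [Finset.sum_congr rfl hrest]
    ring
  | case2 a as b bs count heq hgt ih =>
    intro h1 h2
    rw [matchNumLoop, if_neg heq, if_pos hgt, ih h1 h2.tail]
    simp only [pvM]
    congr 1
    apply Finset.sum_congr rfl
    intro x hx
    have hax : a ≤ x := by
      rcases List.mem_cons.mp (List.mem_toFinset.mp hx) with h | h
      · exact le_of_eq h.symm
      · exact List.rel_of_pairwise_cons h1 h
    have hxb : b ≠ x := by omega
    rw [List.count_cons_of_ne hxb]
  | case3 a as b bs count heq hgt ih =>
    intro h1 h2
    rw [matchNumLoop, if_neg heq, if_neg hgt, ih h1.tail h2]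
    simp only [pvM, List.toFinset_cons]
    have hcount : (b :: bs).count a = 0 := by
      apply List.count_eq_zero_of_not_mem
      intro hmem
      rcases List.mem_cons.mp hmem with h | h
      · omega
      · have := List.rel_of_pairwise_cons h2 h; omega
    rw [pv_sum_insert, pv_sum_erase as.toFinset a
      (fun x => min ((as.count x : Int)) (((b :: bs).count x : Int)))
      (by intro hmem
          simp only [List.count_eq_zero_of_not_mem (by simpa using hmem)]
          push_cast; omega)]
    have hterm : min (((a :: as).count a : Int)) (((b :: bs).count a : Int)) = 0 := by
      rw [hcount]; push_cast; omega
    have hterm2 : min ((as.count a : Int)) (((b :: bs).count a : Int)) = 0 := by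
      rw [hcount]; push_cast; omega
    rw [hterm, hterm2]
    have hrest : ∀ x ∈ as.toFinset.erase a,
        min (((a :: as).count x : Int)) (((b :: bs).count x : Int))
          = min ((as.count x : Int)) (((b :: bs).count x : Int)) := by
      intro x hx
      have hxa : a ≠ x := fun hc => (Finset.mem_erase.mp hx).1 hc.symm
      rw [List.count_cons_of_ne hxa]
    rw [Finset.sum_congr rfl hrest]
  | case4 x x1 count hne =>
    intro _ _
    cases x with
    | nil => simp [matchNumLoop, pvM]
    | cons a as =>
      cases x1 with
      | nil =>
        rw [show matchNumLoop (a :: as) [] count = count from by simp [matchNumLoop]]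
        simp only [pvM, List.count_nil]
        rw [Finset.sum_eq_zero (fun x _ => by push_cast; omega)]
        ring
      | cons b bs => exact absurd (hne a as b bs rfl rfl) not_false

-- B's consuming loop computes the sum of minima, for any nonnegative budget dict
lemma bloop_eq (l : List Int) : ∀ (d : PySem.Dict Int Int) (c : Int),
    (∀ x, 0 ≤ d.getD x 0) →
    (l.foldl bStep (d, c)).2 = c + ∑ x ∈ l.toFinset, min ((l.count x : Int)) (d.getD x 0) := by
  induction l with
  | nil => intro d c _; simp
  | cons a as ih =>
    intro d c hpos
    rw [List.foldl_cons]
    by_cases h : d.getD a 0 > 0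
    · have hstep : bStep (d, c) a = (d.insert a (d.getD a 0 - 1), c + 1) := by
        simp [bStep, h]
      rw [hstep]
      have hpos' : ∀ x, 0 ≤ (d.insert a (d.getD a 0 - 1)).getD x 0 := by
        intro x
        by_cases hx : x = a
        · subst hx; rw [PySem.Dict.getD_insert_self]; omega
        · rw [PySem.Dict.getD_insert_of_ne _ _ _ hx]; exact hpos x
      rw [ih _ _ hpos']
      rw [List.toFinset_cons, pv_sum_insert, pv_sum_erase as.toFinset a
        (fun x => min ((as.count x : Int)) ((d.insert a (d.getD a 0 - 1)).getD x 0))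
        (by intro hmem
            simp only [List.count_eq_zero_of_not_mem (by simpa using hmem),
              PySem.Dict.getD_insert_self]
            push_cast; omega)]
      have hterm : min (((a :: as).count a : Int)) (d.getD a 0)
          = 1 + min ((as.count a : Int)) ((d.insert a (d.getD a 0 - 1)).getD a 0) := by
        rw [List.count_cons_self, PySem.Dict.getD_insert_self]; push_cast; omega
      have hrest : ∀ x ∈ as.toFinset.erase a,
          min (((a :: as).count x : Int)) (d.getD x 0)
            = min ((as.count x : Int)) ((d.insert a (d.getD a 0 - 1)).getD x 0) := by
        intro x hx
        have hxa : x ≠ a := (Finset.mem_erase.mp hx).1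
        rw [List.count_cons_of_ne (fun hc => hxa hc.symm),
          PySem.Dict.getD_insert_of_ne _ _ _ hxa]
      rw [hterm, Finset.sum_congr rfl hrest]
      ring
    · have h0 : d.getD a 0 = 0 := le_antisymm (by omega) (hpos a)
      have hstep : bStep (d, c) a = (d, c) := by simp [bStep, h]
      rw [hstep, ih _ _ hpos]
      rw [List.toFinset_cons, pv_sum_insert, pv_sum_erase as.toFinset a
        (fun x => min ((as.count x : Int)) (d.getD x 0))
        (by intro hmem
            simp only [List.count_eq_zero_of_not_mem (by simpa using hmem), h0]
            push_cast; omega)]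
      have hterm : min (((a :: as).count a : Int)) (d.getD a 0) = 0 := by
        rw [h0]; omega
      have hterm2 : min ((as.count a : Int)) (d.getD a 0) = 0 := by
        rw [h0]; omega
      have hrest : ∀ x ∈ as.toFinset.erase a,
          min (((a :: as).count x : Int)) (d.getD x 0)
            = min ((as.count x : Int)) (d.getD x 0) := by
        intro x hx
        rw [List.count_cons_of_ne (fun hc => (Finset.mem_erase.mp hx).1 hc.symm)]
      rw [hterm, hterm2, Finset.sum_congr rfl hrest]

lemma matchNum_alt_eq_pvM (L1 L2 : List Int) :
    matchNum_alt L1 L2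
      = pvM (PySem.List.sorted L1 (fun x => x) false) (PySem.List.sorted L2 (fun x => x) false) := by
  unfold matchNum_alt
  rw [PySem.Dict.foldl_insert_getD_add_one_eq_counter]
  rw [bloop_eq _ _ _ (by intro x; rw [PySem.Dict.getD_counter]; positivity)]
  simp only [PySem.Dict.getD_counter, pvM, zero_add]

-- ===== VERDICT (by name: the statement is the Claim_ definition above) =====
theorem matchNum_spec : Claim_equal_matchNum := by
  intro L1 L2 _
  unfold Spec_matchNum matchNum
  rw [matchNumLoop_eq_pvM _ _ _ (by simpa using PySem.List.sorted_pairwise L1 (fun x => x))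
      (by simpa using PySem.List.sorted_pairwise L2 (fun x => x)),
    zero_add, matchNum_alt_eq_pvM]
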